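-- pv_equiv track=rewrite | github.com/Donggyu-Kim1/coding_practice | 프로그래머스/1/82612. 부족한 금액 계산하기/부족한 금액 계산하기.py | solution
-- ===== SOURCE A (Python) =====
-- def solution(price, money, count):
--     total = 0
--     for i in range(count+1):
--         total += i
--
--     total_price = price * total
--     if total_price >= money:
--         return total_price-money
--     else:
--         return 0
-- ===== SOURCE B (Python) =====
-- def solution(price, money, count):
--     total = count * (count + 1) // 2 if count > 0 else 0
--     return max(price * total - money, 0)
-- ===== Notes on version B (the rewrite author's own statement) =====
-- stated objective: faster
-- what changed: Replaces the O(count) summation loop with the closed-form triangular number count*(count+1)//2 and the if/else with max(..., 0).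
import Mathlib
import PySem

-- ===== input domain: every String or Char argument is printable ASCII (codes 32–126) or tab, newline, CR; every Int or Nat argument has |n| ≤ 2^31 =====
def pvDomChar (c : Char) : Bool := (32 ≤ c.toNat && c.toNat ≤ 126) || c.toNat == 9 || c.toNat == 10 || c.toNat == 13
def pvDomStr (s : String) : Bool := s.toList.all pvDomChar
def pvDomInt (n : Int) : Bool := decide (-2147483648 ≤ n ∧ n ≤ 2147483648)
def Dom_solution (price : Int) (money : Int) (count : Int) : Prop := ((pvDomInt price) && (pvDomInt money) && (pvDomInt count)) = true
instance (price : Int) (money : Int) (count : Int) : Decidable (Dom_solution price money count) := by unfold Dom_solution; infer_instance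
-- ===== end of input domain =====

-- B replaces A's O(count) summation loop with the closed-form triangular number (faster, O(1)).


-- ===== PORT A =====
def solution (price : Int) (money : Int) (count : Int) : Int :=
  let total := (PySem.List.pyRange 0 (count + 1) 1).foldl (fun acc i => acc + i) 0
  let total_price := price * total
  if total_price ≥ money then total_price - money else 0

-- ===== PORT B =====
def solution_alt (price : Int) (money : Int) (count : Int) : Int :=
  let total := if count > 0 then PySem.Int.floordiv (count * (count + 1)) 2 else 0
  max (price * total - money) 0

-- ===== PRECONDITION & SPEC =====
def Spec_solution (price : Int) (money : Int) (count : Int) (out : Int) : Prop := out = solution_alt price money count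
instance (price : Int) (money : Int) (count : Int) (out : Int) : Decidable (Spec_solution price money count out) := by unfold Spec_solution; infer_instance

-- ===== CLAIM (what is proved, stated in full; the proofs are below) =====
def Claim_equal_solution : Prop := ∀ (price : Int) (money : Int) (count : Int), Dom_solution price money count → Spec_solution price money count (solution price money count)

-- ===== LEMMAS AND PROOFS =====

theorem pv_sum_range (n : Nat) : ∀ acc : Int,
    (PySem.List.pyRange 0 (n : Int) 1).foldl (fun acc i => acc + i) acc
      = acc + ((n : Int) * ((n : Int) - 1)) / 2 := by
  induction n with
  | zero => intro acc; simp [PySem.List.pyRange_one_eq_nil]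
  | succ k ih =>
    intro acc
    have h : PySem.List.pyRange 0 ((k : Int) + 1) 1
        = PySem.List.pyRange 0 (k : Int) 1 ++ [(k : Int)] :=
      PySem.List.pyRange_one_succ_right (by positivity)
    push_cast
    rw [h, List.foldl_append, ih acc]
    have hk : ((k : Int) + 1) * ((k : Int) + 1 - 1) = (k : Int) * ((k : Int) - 1) + (k : Int) * 2 := by ring
    simp only [List.foldl_cons, List.foldl_nil]
    rw [hk, Int.add_mul_ediv_right _ _ (by norm_num : (2:Int) ≠ 0)]
    ring

theorem pv_total_eq (count : Int) :
    (PySem.List.pyRange 0 (count + 1) 1).foldl (fun acc i => acc + i) 0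
      = (if count > 0 then PySem.Int.floordiv (count * (count + 1)) 2 else 0) := by
  by_cases hc : 0 ≤ count
  · obtain ⟨n, rfl⟩ := Int.eq_ofNat_of_zero_le hc
    have := pv_sum_range (n + 1) 0
    push_cast at this ⊢
    rw [this]
    have h2 : PySem.Int.floordiv ((n : Int) * ((n : Int) + 1)) 2 = ((n : Int) * ((n : Int) + 1)) / 2 := by
      simp [PySem.Int.floordiv, Int.fdiv_eq_ediv]
    by_cases hn : (0 : Int) < (n : Int)
    · rw [if_pos hn, h2]; ring_nf
    · have hn0 : (n : Int) = 0 := by omega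
      simp [hn0]
  · have h0 : count + 1 ≤ 0 := by omega
    rw [PySem.List.pyRange_one_eq_nil h0]
    simp [show ¬ count > 0 by omega]

-- ===== VERDICT (by name: the statement is the Claim_ definition above) =====
theorem solution_spec : Claim_equal_solution := by
  intro price money count _
  unfold Spec_solution solution solution_alt
  dsimp only
  rw [pv_total_eq]
  generalize (if count > 0 then PySem.Int.floordiv (count * (count + 1)) 2 else 0) = t
  split_ifs <;> omega
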